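-- pv_equiv track=rewrite | github.com/starrovoyt/simple_anomaly_detector_via_pyspark | anomaly_detection/identifier.py | get_periodicity
-- ===== SOURCE A (Python) =====
-- import collections
--
-- def get_periodicity(value):
--     freqs = []
--     for j in range(2, len(value)):
--         for i in range(0, j):
--             cur_seq = value[i::j]
--             if len(cur_seq) > 1:
--                 c = collections.Counter(cur_seq)
--                 cur_freqs = [val - 1 for val in c.values()]
--                 freqs.append(sum(cur_freqs))
--     return sum(freqs)
-- ===== SOURCE B (Python) =====
-- def get_periodicity(value):
--     n = len(value)
--     total = 0
--     for j in range(2, n):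
--         pairs = set()
--         for p in range(n):
--             pairs.add((p % j, value[p]))
--         total += n - len(pairs)
--     return total
-- ===== Notes on version B (the rewrite author's own statement) =====
-- stated objective: simpler
-- what changed: Instead of slicing value[i::j] for every residue i and counting duplicates per slice with a Counter, B makes one pass over positions per step j, building a single set of (p % j, value[p]) pairs, and uses the identity duplicates = n - distinct pairs (the inert len>1 guard disappears).
import Mathlib
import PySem

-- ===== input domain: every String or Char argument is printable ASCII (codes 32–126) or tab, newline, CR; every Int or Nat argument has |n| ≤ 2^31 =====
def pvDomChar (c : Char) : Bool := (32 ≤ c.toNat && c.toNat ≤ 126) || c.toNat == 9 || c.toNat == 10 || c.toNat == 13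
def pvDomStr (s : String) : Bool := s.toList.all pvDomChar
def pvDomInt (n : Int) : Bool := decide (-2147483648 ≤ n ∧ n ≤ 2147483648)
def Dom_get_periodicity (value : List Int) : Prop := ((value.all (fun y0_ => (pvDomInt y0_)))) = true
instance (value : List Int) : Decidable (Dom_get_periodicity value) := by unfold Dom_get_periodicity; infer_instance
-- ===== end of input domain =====

-- B replaces the per-slice Counter with one set of (p % j, value[p]) pairs per step j and the
-- identity "duplicates = n - distinct"; same values, a simpler single pass per j.

-- ===== PORT A =====
def get_periodicity (value : List Int) : Int :=
  let freqs : List Int :=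
    (PySem.List.pyRange 2 (value.length : Int) 1).foldl (fun freqs j =>
      (PySem.List.pyRange 0 j 1).foldl (fun freqs i =>
        let cur_seq := (PySem.List.slice? value (some i) none j).getD []
        if 1 < cur_seq.length then
          let c := PySem.Dict.counter cur_seq
          let cur_freqs := c.values.map (fun val => val - 1)
          freqs ++ [cur_freqs.sum]
        else freqs) freqs) []
  freqs.sum

-- ===== PORT B =====
def get_periodicity_alt (value : List Int) : Int :=
  let n := value.length
  (PySem.List.pyRange 2 (n : Int) 1).foldl (fun total j =>
    let pairs : PySem.Set (Int × Int) :=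
      (PySem.List.pyRange 0 (n : Int) 1).foldl
        (fun s p => PySem.Set.add s (PySem.Int.mod p j, PySem.List.pyGetD value p 0))
        PySem.Set.empty
    total + ((n : Int) - (pairs.length : Int))) 0

-- ===== PRECONDITION & SPEC =====
def Spec_get_periodicity (value : List Int) (out : Int) : Prop := out = get_periodicity_alt value
instance (value : List Int) (out : Int) : Decidable (Spec_get_periodicity value out) := by unfold Spec_get_periodicity; infer_instance

-- ===== CLAIM (what is proved, stated in full; the proofs are below) =====
def Claim_equal_get_periodicity : Prop := ∀ (value : List Int), Dom_get_periodicity value → Spec_get_periodicity value (get_periodicity value)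

-- ===== LEMMAS AND PROOFS =====

-- list sum over `List.range` equals the Finset sum
theorem pvListSum_range (m : Nat) (f : Nat → Int) :
    ((List.range m).map f).sum = ∑ i ∈ Finset.range m, f i := by
  induction m with
  | zero => simp
  | succ m ih => rw [List.range_succ, Finset.sum_range_succ, List.map_append, List.sum_append]; simp [ih]

-- 'if p(x): out.append(f(x))' loop
theorem pvFoldl_append_ite {α β : Type} (l : List α) (P : α → Prop) [DecidablePred P]
    (f : α → β) (acc : List β) :
    l.foldl (fun acc x => if P x then acc ++ [f x] else acc) acc
      = acc ++ (l.filter (fun x => decide (P x))).map f := by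
  induction l generalizing acc with
  | nil => simp
  | cons x xs ih =>
    by_cases h : P x <;> simp [h, ih]

theorem pvSum_flatMap {α : Type} (l : List α) (g : α → List Int) :
    (l.flatMap g).sum = (l.map (fun x => (g x).sum)).sum := by
  induction l with
  | nil => simp
  | cons x xs ih => simp [List.flatMap_cons, List.sum_append, ih]

theorem pvSum_map_sub_one {α : Type} (l : List α) (f : α → Int) :
    (l.map (fun k => f k - 1)).sum = (l.map f).sum - (l.length : Int) := by
  induction l with
  | nil => simp
  | cons x xs ih => simp [ih]; ring

theorem pvCast_list_sum (l : List Nat) :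
    ((l.map (Nat.cast : Nat → Int)).sum) = (l.sum : Int) := by
  induction l with
  | nil => simp
  | cons x xs ih => rw [List.map_cons, List.sum_cons, ih, List.sum_cons]; push_cast; ring

theorem pvFilterMap_eq_map_of {α β : Type} (l : List α) (f : α → Option β) (g : α → β)
    (h : ∀ a ∈ l, f a = some (g a)) : l.filterMap f = l.map g := by
  induction l with
  | nil => simp
  | cons x xs ih =>
    rw [List.filterMap_cons, h x (by simp), List.map_cons,
      ih (fun a ha => h a (List.mem_cons_of_mem _ ha))]

-- Counter values are the counts of the distinct elements
theorem pvCounter_values (s : List Int) :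
    (PySem.Dict.counter s).values = (PySem.Set.ofList s).map (fun k => (s.count k : Int)) := by
  show ((PySem.Dict.counter s).items.map (·.2)) = _
  rw [PySem.Dict.items_counter]
  simp [List.map_map, Function.comp]

theorem pvSum_count_ofList (s : List Int) :
    ((PySem.Set.ofList s).map (fun k => (s.count k : Int))).sum = (s.length : Int) := by
  have hperm : (PySem.Set.ofList s).Perm s.dedup := by
    rw [List.perm_ext_iff_of_nodup (PySem.Set.nodup_ofList s) s.nodup_dedup]
    intro a; simp [PySem.Set.mem_ofList, List.mem_dedup]
  have h1 : ((PySem.Set.ofList s).map (fun k => (s.count k : Int))).sum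
      = ((s.dedup).map (fun k => (s.count k : Int))).sum :=
    (hperm.map _).sum_eq
  rw [h1, ← List.sum_map_count_dedup_eq_length s, ← pvCast_list_sum, List.map_map]
  rfl

theorem pvOfList_length {α : Type} [BEq α] [LawfulBEq α] [DecidableEq α] (s : List α) :
    ((PySem.Set.ofList s).length : Int) = (s.toFinset.card : Int) := by
  have h1 : (PySem.Set.ofList s).toFinset = s.toFinset := by
    ext a; simp [List.mem_toFinset, PySem.Set.mem_ofList]
  rw [← h1, List.toFinset_card_of_nodup (PySem.Set.nodup_ofList s)]

-- sum of (count - 1) over a Counter = length - number of distinct elements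
theorem pvCounter_term (s : List Int) :
    (((PySem.Dict.counter s).values).map (fun v => v - 1)).sum
      = (s.length : Int) - (s.toFinset.card : Int) := by
  rw [pvCounter_values, List.map_map]
  have h : ((fun v => v - 1) ∘ fun k => (s.count k : Int)) = fun k => (s.count k : Int) - 1 := rfl
  rw [h, pvSum_map_sub_one, pvSum_count_ofList, ← pvOfList_length, pvOfList_length]

theorem pvListRange_toFinset (n : Nat) : (List.range n).toFinset = Finset.range n := by
  ext a; simp

theorem pvListToFinset_map {α β : Type} [DecidableEq α] [DecidableEq β] (l : List α) (f : α → β) :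
    (l.map f).toFinset = l.toFinset.image f := by
  ext b; simp

-- the slice value[i::j] for 0 ≤ i < len, j > 0
theorem pvSlice_char (xs : List Int) (i j : Nat) (hi : i < xs.length) (hj : 0 < j) :
    (PySem.List.slice? xs (some (i : Int)) none (j : Int)).getD []
      = (List.range ((xs.length - i - 1) / j + 1)).map (fun k => xs.getD (i + j * k) 0) := by
  have hjz : ((j : Int)) ≠ 0 := by omega
  simp only [PySem.List.slice?, PySem.List.sliceIndices, if_neg hjz]
  have hstep : ¬ ((j : Int) < 0) := by omega
  simp only [if_neg hstep]
  have hstart : (if (i : Int) < 0 then max ((i : Int) + (xs.length : Int)) 0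
      else min (i : Int) (xs.length : Int)) = (i : Int) := by
    rw [if_neg (by omega)]; omega
  rw [hstart]
  have hlt : (0 : Int) < (j : Int) := by omega
  rw [if_pos hlt, if_pos (by omega : (i : Int) < (xs.length : Int))]
  have hcnt : (((xs.length : Int) - (i : Int) + (j : Int) - 1) / (j : Int)).toNat
      = (xs.length - i - 1) / j + 1 := by
    have h1 : ((xs.length : Int) - (i : Int) + (j : Int) - 1)
        = ((xs.length - i - 1 + j : Nat) : Int) := by push_cast; omega
    rw [h1, ← Int.natCast_div, Int.toNat_natCast, Nat.add_div_right _ hj]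
  rw [hcnt]
  rw [Option.getD_some]
  refine pvFilterMap_eq_map_of _ _ _ ?_
  intro k hk
  rw [List.mem_range] at hk
  have hk' : k ≤ (xs.length - i - 1) / j := by omega
  have hjk : j * k ≤ xs.length - i - 1 := by
    have h := (Nat.le_div_iff_mul_le hj).mp hk'
    have hc : j * k = k * j := Nat.mul_comm j k
    omega
  have hidx : i + j * k < xs.length := by omega
  have htn : ((i : Int) + (j : Int) * (k : Int)).toNat = i + j * k := by omega
  rw [htn, List.getElem?_eq_getElem hidx, List.getD_eq_getElem _ _ hidx]

-- the slice positions i, i+j, i+2j, … are exactly {p < n : p % j = i}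
theorem pvPosns_perm (n i j : Nat) (hij : i < j) (hin : i < n) (hj : 0 < j) :
    ((List.range ((n - i - 1) / j + 1)).map (fun k => i + j * k)).Perm
      ((List.range n).filter (fun p => decide (p % j = i))) := by
  have hinj : Function.Injective (fun k => i + j * k) := by
    intro a b h
    simp only at h
    have : j * a = j * b := by omega
    exact Nat.eq_of_mul_eq_mul_left hj this
  rw [List.perm_ext_iff_of_nodup ((List.nodup_range).map hinj)
    ((List.nodup_range).filter _)]
  intro q
  simp only [List.mem_map, List.mem_range, List.mem_filter, decide_eq_true_eq]
  constructor
  · rintro ⟨k, hk, rfl⟩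
    have hk' : k ≤ (n - i - 1) / j := by omega
    have hjk : j * k ≤ n - i - 1 := by
      have h := (Nat.le_div_iff_mul_le hj).mp hk'
      have hc : j * k = k * j := Nat.mul_comm j k
      omega
    refine ⟨by omega, ?_⟩
    rw [Nat.add_mul_mod_self_left, Nat.mod_eq_of_lt hij]
  · rintro ⟨hq, hmod⟩
    refine ⟨q / j, ?_, ?_⟩
    · have hqd : j * (q / j) + i = q := by rw [← hmod]; exact Nat.div_add_mod q j
      have hc : j * (q / j) = (q / j) * j := Nat.mul_comm _ _
      have h1 : (q / j) * j ≤ n - i - 1 := by omega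
      have := (Nat.le_div_iff_mul_le hj).mpr h1
      omega
    · have hqd : j * (q / j) + i = q := by rw [← hmod]; exact Nat.div_add_mod q j
      omega

-- the per-step-j identity: summed per-slice duplicate counts = n - (number of distinct (residue, value) pairs)
theorem pvPerJ (value : List Int) (j : Nat) (h2 : 2 ≤ j) (_hjn : j < value.length) :
    ((List.range j).map (fun i =>
        ((((List.range value.length).filter (fun p => decide (p % j = i))).length : Int)
          - ((((List.range value.length).filter (fun p => decide (p % j = i))).map
              (fun p => value.getD p 0)).toFinset.card : Int)))).sum
      = (value.length : Int)
        - ((((List.range value.length).map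
            (fun p => (((p % j : Nat) : Int), value.getD p 0))).toFinset.card : Int) : Int) := by
  set n := value.length with hn
  set g0 : Nat → Int := fun p => value.getD p 0 with hg0
  set G : Nat → Int × Int := fun p => (((p % j : Nat) : Int), g0 p) with hG
  have hj : 0 < j := by omega
  -- list sum → Finset sum
  rw [pvListSum_range]
  -- fibre decomposition of n
  have hfib1 : (Finset.range n).card
      = ∑ i ∈ Finset.range j, ((Finset.range n).filter (fun p => p % j = i)).card :=
    Finset.card_eq_sum_card_fiberwise (fun p _ => Finset.mem_range.mpr (Nat.mod_lt p hj))
  -- fibre decomposition of the pair set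
  have hfib2 : ((Finset.range n).image G).card
      = ∑ i ∈ Finset.range j, (((Finset.range n).image G).filter (fun x => x.1.toNat = i)).card :=
    Finset.card_eq_sum_card_fiberwise (by
      intro x hx
      rcases Finset.mem_image.mp hx with ⟨p, _, rfl⟩
      simp only [hG, Int.toNat_natCast]
      exact Finset.mem_range.mpr (Nat.mod_lt p hj))
  -- each pair fibre has the same card as the image of the positions fibre
  have hfibcard : ∀ i ∈ Finset.range j,
      (((Finset.range n).image G).filter (fun x => x.1.toNat = i)).card
        = (((Finset.range n).filter (fun p => p % j = i)).image g0).card := by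
    intro i _
    rw [Finset.filter_image]
    have h1 : ((Finset.range n).filter fun p => (G p).1.toNat = i)
        = (Finset.range n).filter (fun p => p % j = i) := by
      apply Finset.filter_congr
      intro p _
      show ((p % j : Nat) : Int).toNat = i ↔ p % j = i
      rw [Int.toNat_natCast]
    rw [h1]
    have h2 : ((Finset.range n).filter (fun p => p % j = i)).image G
        = (((Finset.range n).filter (fun p => p % j = i)).image g0).image
            (fun v => ((i : Int), v)) := by
      rw [Finset.image_image]
      apply Finset.image_congr
      intro p hp
      have hpm : p % j = i := (Finset.mem_filter.mp (Finset.mem_coe.mp hp)).2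
      show G p = ((i : Int), g0 p)
      show (((p % j : Nat) : Int), g0 p) = ((i : Int), g0 p)
      rw [hpm]
    rw [h2]
    exact Finset.card_image_of_injective _ (fun a b h => by simpa using h)
  -- identify the list-level quantities with the Finset ones
  have hlistfin : ∀ i, ((List.range n).filter (fun p => decide (p % j = i))).toFinset
      = (Finset.range n).filter (fun p => p % j = i) := by
    intro i
    rw [List.toFinset_filter, pvListRange_toFinset]
    apply Finset.filter_congr
    intro p _
    simp
  have hlen : ∀ i, (((List.range n).filter (fun p => decide (p % j = i))).length : Int)
      = (((Finset.range n).filter (fun p => p % j = i)).card : Int) := by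
    intro i
    rw [← hlistfin i, List.toFinset_card_of_nodup ((List.nodup_range).filter _)]
  have hd : ∀ i, ((((List.range n).filter (fun p => decide (p % j = i))).map g0).toFinset.card : Int)
      = ((((Finset.range n).filter (fun p => p % j = i)).image g0).card : Int) := by
    intro i
    rw [pvListToFinset_map, hlistfin i]
  have hT : (((List.range n).map G).toFinset.card : Int)
      = (((Finset.range n).image G).card : Int) := by
    rw [pvListToFinset_map, pvListRange_toFinset]
  calc (∑ i ∈ Finset.range j,
          ((((List.range n).filter (fun p => decide (p % j = i))).length : Int)
            - ((((List.range n).filter (fun p => decide (p % j = i))).map g0).toFinset.card : Int)))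
      = ∑ i ∈ Finset.range j,
          ((((Finset.range n).filter (fun p => p % j = i)).card : Int)
            - ((((Finset.range n).filter (fun p => p % j = i)).image g0).card : Int)) := by
        apply Finset.sum_congr rfl
        intro i _
        rw [hlen i, hd i]
    _ = (∑ i ∈ Finset.range j, (((Finset.range n).filter (fun p => p % j = i)).card : Int))
          - ∑ i ∈ Finset.range j, ((((Finset.range n).filter (fun p => p % j = i)).image g0).card : Int) := by
        rw [Finset.sum_sub_distrib]
    _ = (n : Int) - (((Finset.range n).image G).card : Int) := by
        have e1 : (∑ i ∈ Finset.range j, (((Finset.range n).filter (fun p => p % j = i)).card : Int))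
            = (n : Int) := by
          rw [← Nat.cast_sum, ← hfib1, Finset.card_range]
        have e2 : (∑ i ∈ Finset.range j, ((((Finset.range n).filter (fun p => p % j = i)).image g0).card : Int))
            = (((Finset.range n).image G).card : Int) := by
          rw [← Nat.cast_sum, ← Finset.sum_congr rfl hfibcard, ← hfib2]
        rw [e1, e2]
    _ = (n : Int) - (((List.range n).map G).toFinset.card : Int) := by rw [hT]

-- the contribution of step j in port A equals the contribution of step j in port B
theorem pvSum_filter_map {α β : Type} (l : List α) (e : α → β) (p : β → Bool)
    (f : β → Int) (g : α → Int)
    (h : ∀ x ∈ l, (if p (e x) then f (e x) else 0) = g x) :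
    (((l.map e).filter p).map f).sum = (l.map g).sum := by
  induction l with
  | nil => simp
  | cons x xs ih =>
    have hx := h x (by simp)
    have ih' := ih (fun a ha => h a (by simp [ha]))
    rw [List.map_cons, List.filter_cons]
    by_cases hp : p (e x) = true
    · rw [if_pos hp, List.map_cons, List.sum_cons, ih', List.map_cons, List.sum_cons, ← hx,
        if_pos hp]
    · rw [if_neg hp, ih', List.map_cons, List.sum_cons, ← hx, if_neg hp, zero_add]

-- the contribution of step j in port A equals the contribution of step j in port B
theorem pvStep (value : List Int) (jn : Nat) (h2 : 2 ≤ jn) (hjn : jn < value.length) :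
    ((((List.range jn).map (Nat.cast : Nat → Int)).filter (fun i =>
        decide (1 < ((PySem.List.slice? value (some i) none (jn : Int)).getD []).length))).map
      (fun i => (((PySem.Dict.counter ((PySem.List.slice? value (some i) none (jn : Int)).getD [])).values).map
        (fun v => v - 1)).sum)).sum
    = (value.length : Int)
      - ((((List.range value.length).map
          (fun p => (((p % jn : Nat) : Int), value.getD p 0))).toFinset.card : Int)) := by
  have hj : 0 < jn := by omega
  refine Eq.trans (pvSum_filter_map (List.range jn) (Nat.cast : Nat → Int) _ _ _ ?_)
    (pvPerJ value jn h2 hjn)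
  intro im him
  rw [List.mem_range] at him
  have hin : im < value.length := by omega
  rw [pvSlice_char value im jn hin hj]
  have hpp := pvPosns_perm value.length im jn him hin hj
  have hsp : ((List.range ((value.length - im - 1) / jn + 1)).map
        (fun k => value.getD (im + jn * k) 0)).Perm
      (((List.range value.length).filter (fun p => decide (p % jn = im))).map
        (fun p => value.getD p 0)) := by
    have h := hpp.map (fun p => value.getD p 0)
    rw [List.map_map] at h
    exact h
  have hlen : ((List.range ((value.length - im - 1) / jn + 1)).map
        (fun k => value.getD (im + jn * k) 0)).length
      = ((List.range value.length).filter (fun p => decide (p % jn = im))).length := by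
    rw [hsp.length_eq, List.length_map]
  have htf : ((List.range ((value.length - im - 1) / jn + 1)).map
        (fun k => value.getD (im + jn * k) 0)).toFinset
      = (((List.range value.length).filter (fun p => decide (p % jn = im))).map
          (fun p => value.getD p 0)).toFinset :=
    List.toFinset_eq_of_perm _ _ hsp
  by_cases hguard : 1 < ((List.range ((value.length - im - 1) / jn + 1)).map
      (fun k => value.getD (im + jn * k) 0)).length
  · rw [if_pos (decide_eq_true hguard), pvCounter_term, hlen, htf]
  · rw [if_neg (by simpa using hguard)]
    have hs1 : ((List.range ((value.length - im - 1) / jn + 1)).map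
        (fun k => value.getD (im + jn * k) 0)).length = 1 := by
      rw [List.length_map, List.length_range] at hguard ⊢
      obtain ⟨D, hD⟩ : ∃ D, (value.length - im - 1) / jn = D := ⟨_, rfl⟩
      rw [hD] at hguard ⊢
      omega
    have hfl : ((List.range value.length).filter (fun p => decide (p % jn = im))).length = 1 := by
      rw [← hlen, hs1]
    have hm1 : (((List.range value.length).filter (fun p => decide (p % jn = im))).map
        (fun p => value.getD p 0)).length = 1 := by
      rw [List.length_map]; exact hfl
    obtain ⟨a, ha⟩ := List.length_eq_one_iff.mp hm1
    rw [hfl, ha]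
    simp

theorem pvPyGetD (value : List Int) (p : Nat) :
    PySem.List.pyGetD value ((p : Int)) 0 = value.getD p 0 :=
  PySem.List.pyGetD_natCast value p 0

theorem pvA_eq (value : List Int) :
    get_periodicity value
      = ((PySem.List.pyRange 2 (value.length : Int) 1).map (fun j =>
          ((((PySem.List.pyRange 0 j 1).filter (fun i =>
              decide (1 < ((PySem.List.slice? value (some i) none j).getD []).length))).map
            (fun i => (((PySem.Dict.counter ((PySem.List.slice? value (some i) none j).getD [])).values).map
              (fun v => v - 1)).sum)).sum))).sum := by
  unfold get_periodicity
  simp only [pvFoldl_append_ite, PySem.List.foldl_append_eq_flatMap, List.nil_append]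
  rw [pvSum_flatMap]

theorem pvB_eq (value : List Int) :
    get_periodicity_alt value
      = ((PySem.List.pyRange 2 (value.length : Int) 1).map (fun j =>
          (value.length : Int) -
            ((PySem.Set.ofList ((PySem.List.pyRange 0 (value.length : Int) 1).map
               (fun p => (PySem.Int.mod p j, PySem.List.pyGetD value p 0)))).length : Int))).sum := by
  unfold get_periodicity_alt
  simp only [← PySem.Set.update_map_eq_foldl_add, PySem.Set.update_empty]
  rw [PySem.List.foldl_add, zero_add]

theorem get_periodicity_spec_aux : ∀ (value : List Int),
    get_periodicity value = get_periodicity_alt value := by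
  intro value
  rw [pvA_eq, pvB_eq]
  refine congrArg List.sum (List.map_congr_left ?_)
  intro j hj
  rw [PySem.List.mem_pyRange_one] at hj
  obtain ⟨hj2, hjn⟩ := hj
  obtain ⟨jn, rfl⟩ : ∃ jn : Nat, j = (jn : Int) := ⟨j.toNat, by omega⟩
  have h2 : 2 ≤ jn := by omega
  have hjn' : jn < value.length := by omega
  have hL : (PySem.List.pyRange 0 ((value.length : Nat) : Int) 1).map
        (fun p => (PySem.Int.mod p ((jn : Nat) : Int), PySem.List.pyGetD value p 0))
      = (List.range value.length).map (fun p => (((p % jn : Nat) : Int), value.getD p 0)) := by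
    rw [PySem.List.pyRange_zero_natCast, List.map_map]
    refine List.map_congr_left ?_
    intro p hp
    rw [List.mem_range] at hp
    show (PySem.Int.mod ((p : Nat) : Int) ((jn : Nat) : Int), PySem.List.pyGetD value ((p : Nat) : Int) 0) = _
    rw [PySem.Int.mod_natCast, pvPyGetD value p]
  rw [hL, pvOfList_length, PySem.List.pyRange_zero_natCast]
  exact pvStep value jn h2 hjn'

-- ===== VERDICT (by name: the statement is the Claim_ definition above) =====
theorem get_periodicity_spec : Claim_equal_get_periodicity := by
  intro value _
  show get_periodicity value = get_periodicity_alt value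
  exact get_periodicity_spec_aux value
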